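-- pv_equiv track=rewrite | github.com/TomF98/Precomputing-approach-two-scale-phase-transition-model | Utils/helper_functions.py | create_scatter_idx
-- ===== SOURCE A (Python) =====
-- def create_scatter_idx(df_macro, df_micro, n_processes, df_split, global_idx=True):
--     """
--     For scattering data from process 0 to other processes. Returns what data section
--     each process gets.
--
--     Parameters
--     ==========
--     df_macro : int
--         Number of macro dofs.
--     df_micro : int
--         Number of micro dofs.
--     n_processes : int
--         Number of processes.
--     df_split : int
--         How many cells each process handles.
--     global_idx : bool
--         Process 0 needs to not shift its data.
--     """
--     # last process has more cells:
--     last_process_dofs = df_macro  - (n_processes - 2) * df_split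
--
--     if global_idx:
--         range_list = [df_split*df_micro] * n_processes
--         range_list[-1] = last_process_dofs*df_micro
--     else:
--         range_list = [df_split] * n_processes
--         range_list[-1] = last_process_dofs
--     range_list[0] = df_macro
--
--     displacement_list = []
--     for j in range(n_processes):
--         if j == 0:
--             displacement_list.append(0)
--         else:
--             if global_idx:
--                 displacement_list.append(df_macro + (j-1)*df_split*df_micro)
--             else:
--                 displacement_list.append((j-1)*df_split)
--
--     return range_list, displacement_list
-- ===== SOURCE B (Python) =====
-- def create_scatter_idx(df_macro, df_micro, n_processes, df_split, global_idx=True):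
--     # Build range_list by concatenation and displacement_list with a running offset.
--     unit = df_micro if global_idx else 1
--     step = df_split * unit
--     last = (df_macro - (n_processes - 2) * df_split) * unit
--     if n_processes == 1:
--         range_list = [df_macro]
--     else:
--         range_list = [df_macro] + [step] * (n_processes - 2) + [last]
--     displacement_list = []
--     disp = 0
--     for j in range(n_processes):
--         displacement_list.append(disp)
--         disp += (df_macro if global_idx else 0) if j == 0 else step
--     return range_list, displacement_list
-- ===== Notes on version B (the rewrite author's own statement) =====
-- stated objective: alternative
-- what changed: range_list is built directly by concatenation ([df_macro] + middle + [last]) instead of replicate-then-overwrite of indices -1 and 0, and displacement_list is computed with a running offset accumulator instead of a per-index closed form with branches.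
import Mathlib
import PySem

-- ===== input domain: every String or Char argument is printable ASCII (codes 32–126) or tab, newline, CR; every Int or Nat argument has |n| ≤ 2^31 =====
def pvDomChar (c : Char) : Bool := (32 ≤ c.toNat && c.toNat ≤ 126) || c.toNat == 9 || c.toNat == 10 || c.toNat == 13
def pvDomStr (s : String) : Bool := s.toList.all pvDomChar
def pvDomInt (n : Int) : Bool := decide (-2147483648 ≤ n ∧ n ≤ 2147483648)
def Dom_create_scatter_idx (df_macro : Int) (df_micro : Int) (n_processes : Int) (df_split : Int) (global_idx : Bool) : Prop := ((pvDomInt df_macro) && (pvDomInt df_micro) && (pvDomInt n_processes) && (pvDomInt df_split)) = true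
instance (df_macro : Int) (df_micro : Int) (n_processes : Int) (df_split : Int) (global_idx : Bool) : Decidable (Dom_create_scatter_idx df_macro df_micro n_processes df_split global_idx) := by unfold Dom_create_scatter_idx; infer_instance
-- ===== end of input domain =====

-- B builds range_list by concatenation and displacement_list with a running offset accumulator
-- instead of A's replicate-then-overwrite and per-index closed form (objective: alternative decomposition).

-- ===== PORT A =====
-- Python's range_list[-1] = … is an index update at position n-1 (exact for n_processes ≥ 1, which Pre_ guarantees).
def create_scatter_idx (df_macro : Int) (df_micro : Int) (n_processes : Int) (df_split : Int) (global_idx : Bool) : List Int × List Int :=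
  let last_process_dofs := df_macro - (n_processes - 2) * df_split
  let range_list :=
    if global_idx then
      (List.replicate n_processes.toNat (df_split * df_micro)).set (n_processes.toNat - 1) (last_process_dofs * df_micro)
    else
      (List.replicate n_processes.toNat df_split).set (n_processes.toNat - 1) last_process_dofs
  let range_list := range_list.set 0 df_macro
  let displacement_list :=
    (PySem.List.pyRange 0 n_processes 1).foldl
      (fun acc j =>
        if j == 0 then acc ++ [(0 : Int)]
        else if global_idx then acc ++ [df_macro + (j - 1) * df_split * df_micro]
        else acc ++ [(j - 1) * df_split]) []
  (range_list, displacement_list)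

-- ===== PORT B =====
def create_scatter_idx_alt (df_macro : Int) (df_micro : Int) (n_processes : Int) (df_split : Int) (global_idx : Bool) : List Int × List Int :=
  let unit := if global_idx then df_micro else 1
  let step := df_split * unit
  let last := (df_macro - (n_processes - 2) * df_split) * unit
  let range_list :=
    if n_processes == 1 then [df_macro]
    else df_macro :: (List.replicate (n_processes - 2).toNat step ++ [last])
  let p :=
    (PySem.List.pyRange 0 n_processes 1).foldl
      (fun (st : List Int × Int) j =>
        (st.1 ++ [st.2], st.2 + (if j == 0 then (if global_idx then df_macro else 0) else step)))
      ([], 0)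
  (range_list, p.1)

-- ===== PRECONDITION & SPEC =====
-- Pre_ excludes only n_processes ≤ 0, where A raises IndexError on range_list[-1].
def Pre_create_scatter_idx (df_macro : Int) (df_micro : Int) (n_processes : Int) (df_split : Int) (global_idx : Bool) : Prop := 1 ≤ n_processes
instance (df_macro : Int) (df_micro : Int) (n_processes : Int) (df_split : Int) (global_idx : Bool) : Decidable (Pre_create_scatter_idx df_macro df_micro n_processes df_split global_idx) := by unfold Pre_create_scatter_idx; infer_instance
def pvWitness_create_scatter_idx : Int × Int × Int × Int × Bool := (10, 3, 4, 2, true)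
def Spec_create_scatter_idx (df_macro : Int) (df_micro : Int) (n_processes : Int) (df_split : Int) (global_idx : Bool) (out : List Int × List Int) : Prop := out = create_scatter_idx_alt df_macro df_micro n_processes df_split global_idx
instance (df_macro : Int) (df_micro : Int) (n_processes : Int) (df_split : Int) (global_idx : Bool) (out : List Int × List Int) : Decidable (Spec_create_scatter_idx df_macro df_micro n_processes df_split global_idx out) := by unfold Spec_create_scatter_idx; infer_instance

-- ===== CLAIM =====
def Claim_equal_create_scatter_idx : Prop := ∀ (df_macro : Int) (df_micro : Int) (n_processes : Int) (df_split : Int) (global_idx : Bool), Dom_create_scatter_idx df_macro df_micro n_processes df_split global_idx → Pre_create_scatter_idx df_macro df_micro n_processes df_split global_idx → Spec_create_scatter_idx df_macro df_micro n_processes df_split global_idx (create_scatter_idx df_macro df_micro n_processes df_split global_idx)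

-- ===== LEMMAS AND PROOFS =====

-- replicate (k+1), overwritten at its last position, is replicate k ++ [w]
theorem pv_replicate_set_last (k : Nat) (v w : Int) :
    (List.replicate (k + 1) v).set k w = List.replicate k v ++ [w] := by
  induction k with
  | zero => rfl
  | succ n ih =>
      show v :: (List.replicate (n + 1) v).set n w = v :: (List.replicate n v ++ [w])
      rw [ih]

-- the two displacement loops agree, and the running offset has the stated closed form
theorem pv_disp_key (first step : Int) (n : Nat) :
    (PySem.List.pyRange 0 (n : Int) 1).foldl
        (fun (st : List Int × Int) j => (st.1 ++ [st.2], st.2 + (if j == 0 then first else step)))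
        ([], 0)
    = ((PySem.List.pyRange 0 (n : Int) 1).foldl
        (fun acc j => if j == 0 then acc ++ [(0 : Int)] else acc ++ [first + (j - 1) * step]) [],
       if n = 0 then (0 : Int) else first + ((n : Int) - 1) * step) := by
  induction n with
  | zero => simp
  | succ m ih =>
      have hsplit : PySem.List.pyRange 0 ((m + 1 : Nat) : Int) 1
          = PySem.List.pyRange 0 (m : Int) 1 ++ [(m : Int)] := by
        push_cast
        exact PySem.List.pyRange_one_succ_right (by positivity)
      rw [hsplit, List.foldl_append, List.foldl_append, ih]
      rcases Nat.eq_zero_or_pos m with hm | hm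
      · subst hm; simp
      · have hne : ((m : Int) == 0) = false := by
          simp; omega
        simp only [List.foldl_cons, List.foldl_nil, hne, if_neg (by omega : ¬ m = 0),
          if_neg (by omega : ¬ m + 1 = 0), Bool.false_eq_true, if_false, Prod.mk.injEq]
        exact ⟨trivial, by push_cast; ring⟩

-- A's branch-shaped loop body equals the uniform-body shape used in pv_disp_key (global case)
theorem pv_funext_global (df_macro df_micro df_split : Int) :
    (fun (acc : List Int) (j : Int) =>
        if j == 0 then acc ++ [(0 : Int)]
        else acc ++ [df_macro + (j - 1) * df_split * df_micro])
    = (fun acc j => if j == 0 then acc ++ [(0 : Int)]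
        else acc ++ [df_macro + (j - 1) * (df_split * df_micro)]) := by
  funext acc j
  by_cases h : j = 0 <;> simp [h, mul_assoc]

-- A's branch-shaped loop body equals the uniform-body shape used in pv_disp_key (non-global case)
theorem pv_funext_local (df_split : Int) :
    (fun (acc : List Int) (j : Int) =>
        if j == 0 then acc ++ [(0 : Int)] else acc ++ [(j - 1) * df_split])
    = (fun acc j => if j == 0 then acc ++ [(0 : Int)]
        else acc ++ [0 + (j - 1) * df_split]) := by
  funext acc j
  by_cases h : j = 0 <;> simp [h]

-- the range lists agree for n_processes = k+1 ≥ 1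
theorem pv_range_eq (k : Nat) (v w m : Int) :
    ((List.replicate (k + 1) v).set k w).set 0 m
    = (if ((k : Int) + 1 == 1) then [m] else m :: (List.replicate (((k : Int) + 1 - 2)).toNat v ++ [w])) := by
  rw [pv_replicate_set_last]
  rcases Nat.eq_zero_or_pos k with hk | hk
  · subst hk; simp
  · have h1 : (((k : Int) + 1) == 1) = false := by simp; omega
    rw [h1]
    obtain ⟨j, rfl⟩ : ∃ j, k = j + 1 := ⟨k - 1, by omega⟩
    have h2 : ((j : Int) + 1 + 1 - 2).toNat = j := by omega
    simp [h2, List.replicate_succ]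

-- ===== VERDICT =====
theorem create_scatter_idx_spec : Claim_equal_create_scatter_idx := by
  intro df_macro df_micro n_processes df_split global_idx _ hpre
  unfold Spec_create_scatter_idx create_scatter_idx create_scatter_idx_alt
  have hpre' : (1 : Int) ≤ n_processes := hpre
  obtain ⟨k, hk⟩ : ∃ k : Nat, n_processes = (k : Int) + 1 :=
    ⟨(n_processes - 1).toNat, by omega⟩
  subst hk
  have htn : ((k : Int) + 1).toNat = k + 1 := by omega
  have hcast : ((k : Int) + 1) = ((k + 1 : Nat) : Int) := by push_cast; ring
  cases global_idx with
  | true =>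
      simp only [htn, Nat.add_sub_cancel, if_true, Prod.mk.injEq]
      refine ⟨pv_range_eq k (df_split * df_micro)
        ((df_macro - ((k : Int) + 1 - 2) * df_split) * df_micro) df_macro, ?_⟩
      rw [hcast, pv_funext_global df_macro df_micro df_split,
        pv_disp_key df_macro (df_split * df_micro) (k + 1)]
  | false =>
      simp only [htn, Nat.add_sub_cancel, Bool.false_eq_true, if_false, mul_one, Prod.mk.injEq]
      refine ⟨pv_range_eq k df_split (df_macro - ((k : Int) + 1 - 2) * df_split) df_macro, ?_⟩
      rw [hcast, pv_funext_local df_split, pv_disp_key 0 df_split (k + 1)]
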